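-- pv_equiv track=rewrite | github.com/snsnlou4/superset | typecheck.py | process_duplicates
-- ===== SOURCE A (Python) =====
-- from typing import List, Tuple
--
-- def process_duplicates(files: List[str]):
--     file_name_set = set()
--     base_file_list = []
--     duplicate_file_list = []
--     for file in files:
--         file_split = file.split("/")
--         file_name = file_split[len(file_split) - 1]
--         if file_name not in file_name_set:
--             file_name_set.add(file_name)
--             base_file_list.append(file)
--         else:
--             duplicate_file_list.append(file)
--     return base_file_list,duplicate_file_list
-- ===== SOURCE B (Python) =====
-- from typing import List, Tuple
--
-- def process_duplicates(files: List[str]):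
--     first_index = {}
--     for i, file in enumerate(files):
--         first_index.setdefault(file.split("/")[-1], i)
--     base_file_list = [file for i, file in enumerate(files)
--                       if first_index[file.split("/")[-1]] == i]
--     duplicate_file_list = [file for i, file in enumerate(files)
--                            if first_index[file.split("/")[-1]] != i]
--     return base_file_list, duplicate_file_list
-- ===== Notes on version B (the rewrite author's own statement) =====
-- stated objective: alternative
-- what changed: Replaces A's single stateful loop (mutable seen-set deciding base vs duplicate as it goes) by a two-phase decomposition: first build a basename -> first-occurrence-index table with dict.setdefault, then partition enumerate(files) in original order by whether the stored first index equals the current index.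
import Mathlib
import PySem

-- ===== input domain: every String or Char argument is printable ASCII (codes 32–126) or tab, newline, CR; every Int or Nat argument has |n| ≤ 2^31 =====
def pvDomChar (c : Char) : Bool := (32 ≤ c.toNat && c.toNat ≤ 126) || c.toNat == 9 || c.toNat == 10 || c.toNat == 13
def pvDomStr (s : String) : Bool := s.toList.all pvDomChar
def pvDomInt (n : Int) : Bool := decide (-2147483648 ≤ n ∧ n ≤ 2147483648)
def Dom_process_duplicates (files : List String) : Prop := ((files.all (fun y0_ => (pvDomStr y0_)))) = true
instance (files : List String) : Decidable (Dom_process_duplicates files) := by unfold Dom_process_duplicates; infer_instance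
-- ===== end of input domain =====

-- B replaces A's single stateful set-membership loop by a first-occurrence index table built with
-- setdefault plus an order-preserving partition of enumerate(files); objective: alternative.

-- ===== PORT A =====
-- the loop body of A: file.split("/")[len(file_split)-1]; split? "/" is always some (sep nonempty)
-- and the index is always in range (split never returns []), so the getD defaults are never used
def pdStep (st : PySem.Set String × List String × List String) (file : String) :
    PySem.Set String × List String × List String :=
  let s := st.1
  let b := st.2.1
  let d := st.2.2
  let file_split := (PySem.Str.split? file "/").getD []
  let file_name := (PySem.List.pyGet? file_split ((file_split.length : Int) - 1)).getD ""
  if !(PySem.Set.contains s file_name) then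
    (PySem.Set.add s file_name, b ++ [file], d)
  else
    (s, b, d ++ [file])

def process_duplicates (files : List String) : List String × List String :=
  let res := files.foldl pdStep (PySem.Set.empty, [], [])
  (res.2.1, res.2.2)

-- ===== PORT B =====
-- file.split("/")[-1], the basename expression Source B computes three times
def pvName (file : String) : String :=
  (PySem.List.pyGet? ((PySem.Str.split? file "/").getD []) (-1)).getD ""

-- first_index[name] == i : the key is always present, so get? returns some
def process_duplicates_alt (files : List String) : List String × List String :=
  let first_index := (PySem.List.enumerate files).foldl
    (fun (d : PySem.Dict String Int) p => d.setdefault (pvName p.2) p.1)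
    PySem.Dict.empty
  (((PySem.List.enumerate files).filter
      (fun p => first_index.get? (pvName p.2) == some p.1)).map (·.2),
   ((PySem.List.enumerate files).filter
      (fun p => first_index.get? (pvName p.2) != some p.1)).map (·.2))

-- ===== PRECONDITION & SPEC =====
def Spec_process_duplicates (files : List String) (out : List String × List String) : Prop := out = process_duplicates_alt files
instance (files : List String) (out : List String × List String) : Decidable (Spec_process_duplicates files out) := by unfold Spec_process_duplicates; infer_instance

-- ===== CLAIM (what is proved, stated in full; the proofs are below) =====
def Claim_equal_process_duplicates : Prop := ∀ (files : List String), Dom_process_duplicates files → Spec_process_duplicates files (process_duplicates files)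

-- ===== LEMMAS AND PROOFS =====

-- xs[len(xs)-1] and xs[-1] are the same Python access
lemma pyGet_last (l : List String) :
    PySem.List.pyGet? l ((l.length : Int) - 1) = PySem.List.pyGet? l (-1) := by
  cases l with
  | nil => simp
  | cons x xs =>
    rw [PySem.List.pyGet?_neg_one, List.getLast?_eq_getElem?]
    have h : (((x::xs).length : Int)) - 1 = (((x::xs).length - 1 : Nat) : Int) := by
      push_cast [List.length_cons]; ring
    rw [h, PySem.List.pyGet?_natCast]

-- index (counting from s) of the first element of l whose basename is k
def firstFind (l : List String) (s : Int) (k : String) : Option Int :=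
  match l with
  | [] => none
  | f :: r => if pvName f == k then some s else firstFind r (s + 1) k

lemma ff_none (l : List String) (s : Int) (k : String) :
    firstFind l s k = none ↔ k ∉ l.map pvName := by
  induction l generalizing s with
  | nil => simp [firstFind]
  | cons f r ih =>
    by_cases h : pvName f = k
    · simp [firstFind, h]
    · simp [firstFind, h, ih, Ne.symm h]

lemma ff_lt (l : List String) (s : Int) (k : String) (j : Int) :
    firstFind l s k = some j → s ≤ j ∧ j < s + l.length := by
  induction l generalizing s with
  | nil => simp [firstFind]
  | cons f r ih =>
    by_cases h : pvName f = k
    · simp [firstFind, h]; intro hj; subst hj; constructor <;> [omega; (push_cast; omega)]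
    · simp only [firstFind, h, beq_iff_eq, if_neg h]
      intro hj
      have := ih (s+1) hj
      simp only [List.length_cons]
      push_cast
      omega

lemma ff_append (a b : List String) (s : Int) (k : String) :
    firstFind (a ++ b) s k
    = match firstFind a s k with
      | some j => some j
      | none => firstFind b (s + a.length) k := by
  induction a generalizing s with
  | nil => simp [firstFind]
  | cons f r ih =>
    by_cases h : pvName f = k
    · simp [firstFind, h]
    · simp only [List.cons_append, firstFind, h, beq_iff_eq, if_neg h, ih]
      have : s + 1 + (r.length : Int) = s + (↑r.length + 1) := by ring
      simp only [List.length_cons]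
      push_cast
      rw [this]

lemma key_iff (pre suf : List String) (f : String) :
    firstFind (pre ++ f :: suf) 0 (pvName f) = some (pre.length : Int)
    ↔ pvName f ∉ pre.map pvName := by
  constructor
  · intro h hmem
    have hne : firstFind pre 0 (pvName f) ≠ none := by
      intro hn; exact (ff_none _ _ _).mp hn hmem
    obtain ⟨j, hj⟩ := Option.ne_none_iff_exists'.mp hne
    rw [ff_append, hj] at h
    have := ff_lt pre 0 (pvName f) j hj
    simp at h
    omega
  · intro hmem
    have h0 : firstFind pre 0 (pvName f) = none := (ff_none _ _ _).mpr hmem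
    rw [ff_append, h0]
    simp [firstFind]

-- the common recursive shape both ports reduce to (seen = basenames of the processed prefix)
def Gb (seen : List String) : List String → List String
  | [] => []
  | f :: r => if pvName f ∈ seen then Gb (seen ++ [pvName f]) r
              else f :: Gb (seen ++ [pvName f]) r

def Gd (seen : List String) : List String → List String
  | [] => []
  | f :: r => if pvName f ∈ seen then f :: Gd (seen ++ [pvName f]) r
              else Gd (seen ++ [pvName f]) r

lemma G_congr (suf : List String) (s1 s2 : List String) (h : ∀ k, k ∈ s1 ↔ k ∈ s2) :
    Gb s1 suf = Gb s2 suf ∧ Gd s1 suf = Gd s2 suf := by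
  induction suf generalizing s1 s2 with
  | nil => simp [Gb, Gd]
  | cons f r ih =>
    have h' : ∀ k, k ∈ s1 ++ [pvName f] ↔ k ∈ s2 ++ [pvName f] := by
      intro k; simp [h k]
    obtain ⟨hb, hd⟩ := ih (s1 ++ [pvName f]) (s2 ++ [pvName f]) h'
    by_cases hm : pvName f ∈ s1
    · simp [Gb, Gd, hm, (h _).mp hm, hb, hd]
    · have hm2 : pvName f ∉ s2 := fun hx => hm ((h _).mpr hx)
      simp [Gb, Gd, hm, hm2, hb, hd]

-- lookup in the setdefault-built dict = first matching index
lemma sd_get (ps : List (Int × String)) (d : PySem.Dict String Int) (k : String) :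
    (ps.foldl (fun (d : PySem.Dict String Int) p => d.setdefault (pvName p.2) p.1) d).get? k
    = match d.get? k with
      | some v => some v
      | none => ((ps.find? (fun p => pvName p.2 == k)).map (·.1)) := by
  induction ps generalizing d with
  | nil => cases h : d.get? k <;> simp [h]
  | cons p ps ih =>
    rw [List.foldl_cons, ih]
    by_cases hk : pvName p.2 = k
    · subst hk
      rw [PySem.Dict.get?_setdefault_self]
      cases h : d.get? (pvName p.2) <;> simp [h, List.find?_cons]
    · rw [PySem.Dict.get?_setdefault_of_ne _ _ (Ne.symm hk)]
      cases h : d.get? k <;> simp [h, List.find?_cons, hk]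

lemma find_enum (l : List String) (s : Int) (k : String) :
    (((PySem.List.enumerate l s).find? (fun p => pvName p.2 == k)).map (·.1))
    = firstFind l s k := by
  induction l generalizing s with
  | nil => simp [PySem.List.enumerate_nil, firstFind]
  | cons f r ih =>
    rw [PySem.List.enumerate_cons]
    by_cases h : pvName f = k
    · simp [List.find?_cons, h, firstFind]
    · have h2 : firstFind (f :: r) s k = firstFind r (s + 1) k := by
        simp [firstFind, h]
      have hbeq : (pvName f == k) = false := by simp [h]
      rw [List.find?_cons, h2]
      simp only [hbeq]
      exact ih (s + 1)

-- B's two filtered projections of enumerate equal the recursive shape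
lemma mainB (suf : List String) (pre : List String) :
    (((PySem.List.enumerate suf (pre.length : Int)).filter
        (fun p => firstFind (pre ++ suf) 0 (pvName p.2) == some p.1)).map (·.2)
      = Gb (pre.map pvName) suf)
    ∧ (((PySem.List.enumerate suf (pre.length : Int)).filter
        (fun p => firstFind (pre ++ suf) 0 (pvName p.2) != some p.1)).map (·.2)
      = Gd (pre.map pvName) suf) := by
  induction suf generalizing pre with
  | nil => simp [PySem.List.enumerate_nil, Gb, Gd]
  | cons f r ih =>
    have hassoc : pre ++ f :: r = (pre ++ [f]) ++ r := by simp
    have hlen : ((pre ++ [f]).length : Int) = (pre.length : Int) + 1 := by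
      simp
    have hnames : (pre ++ [f]).map pvName = pre.map pvName ++ [pvName f] := by simp
    obtain ⟨ihb, ihd⟩ := ih (pre ++ [f])
    simp only [List.append_assoc, List.singleton_append, List.length_append,
      List.length_cons, List.length_nil, List.map_append, List.map_cons, List.map_nil] at ihb ihd
    push_cast at ihb ihd
    rw [PySem.List.enumerate_cons]
    by_cases hm : pvName f ∈ pre.map pvName
    · have hne : firstFind (pre ++ f :: r) 0 (pvName f) ≠ some (pre.length : Int) := by
        intro h; exact ((key_iff pre r f).mp h) hm
      constructor
      · simp only [List.filter_cons]
        rw [Gb]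
        simp [hne, hm, ihb]
      · simp only [List.filter_cons]
        rw [Gd]
        simp [hne, hm, ihd]
    · have heq : firstFind (pre ++ f :: r) 0 (pvName f) = some (pre.length : Int) :=
        (key_iff pre r f).mpr hm
      constructor
      · simp only [List.filter_cons]
        rw [Gb]
        simp [heq, hm, ihb]
      · simp only [List.filter_cons]
        rw [Gd]
        simp [heq, hm, ihd]

lemma nameA_eq (file : String) :
    (PySem.List.pyGet? ((PySem.Str.split? file "/").getD [])
      ((((PySem.Str.split? file "/").getD []).length : Int) - 1)).getD ""
    = pvName file := by
  unfold pvName; rw [pyGet_last]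

lemma pdStep_eq (st : PySem.Set String × List String × List String) (f : String) :
    pdStep st f = if pvName f ∈ st.1 then (st.1, st.2.1, st.2.2 ++ [f])
                  else (st.1 ++ [pvName f], st.2.1 ++ [f], st.2.2) := by
  unfold pdStep
  simp only [nameA_eq]
  by_cases hm : pvName f ∈ st.1
  · have hc : PySem.Set.contains st.1 (pvName f) = true := (PySem.Set.contains_iff _ _).mpr hm
    rw [hc]
    simp [hm]
  · have hc : PySem.Set.contains st.1 (pvName f) = false := by
      rw [← Bool.not_eq_true, PySem.Set.contains_iff]; exact hm
    rw [hc]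
    simp [hm, PySem.Set.add_of_not_mem hm]

-- A's fold equals the recursive shape
lemma mainA (suf : List String) (s : PySem.Set String) (b d : List String) :
    (suf.foldl pdStep (s, b, d)).2 = (b ++ Gb s suf, d ++ Gd s suf) := by
  induction suf generalizing s b d with
  | nil => simp [Gb, Gd]
  | cons f r ih =>
    rw [List.foldl_cons, pdStep_eq]
    by_cases hm : pvName f ∈ s
    · rw [if_pos hm, ih]
      have hcongr := G_congr r (s ++ [pvName f]) s (by
        intro k
        simp only [List.mem_append, List.mem_singleton]
        constructor
        · rintro (h | h)
          · exact h
          · exact h ▸ hm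
        · exact Or.inl)
      rw [Gb, Gd]
      simp [hm, hcongr.1, hcongr.2]
    · rw [if_neg hm, ih]
      rw [Gb, Gd]
      simp [hm]

lemma ab_eq (files : List String) : process_duplicates files = process_duplicates_alt files := by
  unfold process_duplicates process_duplicates_alt
  have hfi : ∀ k, ((PySem.List.enumerate files 0).foldl
      (fun (d : PySem.Dict String Int) p => d.setdefault (pvName p.2) p.1)
      PySem.Dict.empty).get? k = firstFind files 0 k := by
    intro k
    rw [sd_get]
    simp only [PySem.Dict.get?_empty]
    exact find_enum files 0 k
  have hpred1 : (fun (p : Int × String) => ((PySem.List.enumerate files 0).foldl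
      (fun (d : PySem.Dict String Int) p => d.setdefault (pvName p.2) p.1)
      PySem.Dict.empty).get? (pvName p.2) == some p.1)
      = (fun p => firstFind ([] ++ files) 0 (pvName p.2) == some p.1) := by
    funext p; rw [hfi]; simp
  have hpred2 : (fun (p : Int × String) => ((PySem.List.enumerate files 0).foldl
      (fun (d : PySem.Dict String Int) p => d.setdefault (pvName p.2) p.1)
      PySem.Dict.empty).get? (pvName p.2) != some p.1)
      = (fun p => firstFind ([] ++ files) 0 (pvName p.2) != some p.1) := by
    funext p; rw [hfi]; simp
  have hA := mainA files PySem.Set.empty [] []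
  obtain ⟨hB1, hB2⟩ := mainB files []
  simp only [List.length_nil, Nat.cast_zero, List.map_nil] at hB1 hB2
  simp only [hpred1, hpred2, hB1, hB2]
  have hA' : (List.foldl pdStep (PySem.Set.empty, [], []) files).2
      = (Gb [] files, Gd [] files) := by
    simpa using mainA files PySem.Set.empty [] []
  exact (Prod.mk.eta).trans hA'

-- ===== VERDICT (by name: the statement is the Claim_ definition above) =====
theorem process_duplicates_spec : Claim_equal_process_duplicates := by
  intro files _
  unfold Spec_process_duplicates
  exact ab_eq files
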